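-- pv_equiv track=rewrite | github.com/timkimcool/AdventOfCode2021 | 03/03.py | getCommonBitDict
-- ===== SOURCE A (Python) =====
-- def getCommonBitDict(data):
--   dict = {}
--   for x in range(0, len(data[0])):
--     dict[x] = 0
--   for line in data:
--     for x in range(0, len(line)):
--       dict[x] += 1 if line[x] == "0" else -1
--   return dict
-- ===== SOURCE B (Python) =====
-- def getCommonBitDict(data):
--   m = len(data[0])
--   d = {}
--   for x in range(m):
--     c0 = sum(1 for line in data if x < len(line) and line[x] == "0")
--     n = sum(1 for line in data if x < len(line))
--     d[x] = 2 * c0 - n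
--   return d
-- ===== Notes on version B (the rewrite author's own statement) =====
-- stated objective: alternative
-- what changed: Column-major recomputation: instead of initialising a dict and accumulating +1/-1 per character row by row, B computes each position's value directly by counting zeros and valid entries in that column and using the closed form 2*zeros - total.
import Mathlib
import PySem

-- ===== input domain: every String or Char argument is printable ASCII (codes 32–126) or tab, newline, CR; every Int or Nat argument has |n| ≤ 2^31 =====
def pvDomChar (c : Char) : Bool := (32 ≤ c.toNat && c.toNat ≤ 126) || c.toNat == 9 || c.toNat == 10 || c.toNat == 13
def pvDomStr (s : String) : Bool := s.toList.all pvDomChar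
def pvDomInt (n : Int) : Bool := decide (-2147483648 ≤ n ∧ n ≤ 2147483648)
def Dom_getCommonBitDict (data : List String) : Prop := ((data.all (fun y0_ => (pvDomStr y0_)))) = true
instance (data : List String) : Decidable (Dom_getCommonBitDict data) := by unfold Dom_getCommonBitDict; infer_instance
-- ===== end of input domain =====

-- B rebuilds each column value from a closed-form count (2*zeros - entries) instead of A's row-by-row +1/-1 accumulation into a dict.

-- ===== PORT A =====
def getCommonBitDict (data : List String) : List (Int × Int) :=
  let d0 : PySem.Dict Int Int :=
    (PySem.List.pyRange 0 (PySem.Str.len (PySem.List.pyGetD data 0 "")) 1).foldl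
      (fun d x => d.insert x 0) PySem.Dict.empty
  let d1 : PySem.Dict Int Int :=
    data.foldl (fun d line =>
      (PySem.List.pyRange 0 (PySem.Str.len line) 1).foldl
        (fun d x => d.insert x (d.getD x 0 + (if PySem.Str.pyGet? line x = some '0' then 1 else -1))) d) d0
  d1.items

-- ===== PORT B =====
def getCommonBitDict_alt (data : List String) : List (Int × Int) :=
  let m : Int := PySem.Str.len (PySem.List.pyGetD data 0 "")
  let d : PySem.Dict Int Int :=
    (PySem.List.pyRange 0 m 1).foldl (fun d x =>
      -- sum(1 for line in data if x < len(line) and line[x] == "0"): for 0 ≤ x,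
      -- pyGet? line x = some '0' holds exactly when x < len(line) and line[x] == "0"
      let c0 : Int := data.countP (fun line => PySem.Str.pyGet? line x == some '0')
      let n : Int := data.countP (fun line => decide (x < PySem.Str.len line))
      d.insert x (2 * c0 - n)) PySem.Dict.empty
  d.items

-- ===== PRECONDITION & SPEC =====
-- Pre_ excludes exactly the inputs where A raises: empty data (IndexError on data[0]) and
-- any line longer than data[0] (KeyError on the missing dict key).
def Pre_getCommonBitDict (data : List String) : Prop :=
  data ≠ [] ∧ ∀ line ∈ data, PySem.Str.len line ≤ PySem.Str.len (data.headD "")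
instance (data : List String) : Decidable (Pre_getCommonBitDict data) := by
  unfold Pre_getCommonBitDict; infer_instance
def pvWitness_getCommonBitDict : List String := ["10", "01", "1"]
def Spec_getCommonBitDict (data : List String) (out : List (Int × Int)) : Prop := out = getCommonBitDict_alt data
instance (data : List String) (out : List (Int × Int)) : Decidable (Spec_getCommonBitDict data out) := by unfold Spec_getCommonBitDict; infer_instance

-- ===== CLAIM (what is proved, stated in full; the proofs are below) =====
def Claim_equal_getCommonBitDict : Prop := ∀ (data : List String), Dom_getCommonBitDict data → Pre_getCommonBitDict data → Spec_getCommonBitDict data (getCommonBitDict data)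

-- ===== LEMMAS AND PROOFS =====

-- Bridge: for a nonnegative index, Python's s[x] is the list lookup.
theorem str_pyGet?_nonneg (s : String) (x : Int) (hx : 0 ≤ x) :
    PySem.Str.pyGet? s x = s.toList[x.toNat]? := by
  lift x to ℕ using hx
  simp

-- The per-line contribution of column y in A's inner loop.
def pvContrib (y : Int) (line : String) : Int :=
  if 0 ≤ y ∧ y < PySem.Str.len line then
    (if PySem.Str.pyGet? line y = some '0' then 1 else -1) else 0

-- One pass of an "d[x] += f x" loop over distinct contained keys.
theorem foldl_insert_upd (f : Int → Int) (l : List Int) (d : PySem.Dict Int Int)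
    (hc : ∀ x ∈ l, d.contains x = true) (hnd : l.Nodup) :
    (∀ y, (l.foldl (fun d x => d.insert x (d.getD x 0 + f x)) d).contains y = d.contains y) ∧
    (l.foldl (fun d x => d.insert x (d.getD x 0 + f x)) d).keys = d.keys ∧
    (∀ y, (l.foldl (fun d x => d.insert x (d.getD x 0 + f x)) d).getD y 0
        = d.getD y 0 + (if y ∈ l then f y else 0)) := by
  induction l generalizing d with
  | nil => simp
  | cons x l ih =>
    have hcx : d.contains x = true := hc x (by simp)
    have hcont : ∀ y, (d.insert x (d.getD x 0 + f x)).contains y = d.contains y := by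
      intro y
      rw [PySem.Dict.contains_insert]
      by_cases hyx : y = x
      · subst hyx; simp [hcx]
      · simp [hyx]
    have hc' : ∀ z ∈ l, (d.insert x (d.getD x 0 + f x)).contains z = true := by
      intro z hz; rw [hcont]; exact hc z (by simp [hz])
    obtain ⟨ih1, ih2, ih3⟩ := ih (d.insert x (d.getD x 0 + f x)) hc' hnd.of_cons
    refine ⟨?_, ?_, ?_⟩
    · intro y; simp only [List.foldl_cons]; rw [ih1, hcont]
    · simp only [List.foldl_cons]; rw [ih2, PySem.Dict.keys_insert_of_contains _ _ hcx]
    · intro y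
      simp only [List.foldl_cons]
      rw [ih3, PySem.Dict.getD_insert]
      by_cases hyx : y = x
      · subst hyx
        have : y ∉ l := (List.nodup_cons.mp hnd).1
        simp [this]
      · simp [hyx, List.mem_cons]
  
-- A's outer loop: keys stay 0..M-1, and each key accumulates its column contributions.
theorem outer_loop (M : Int) (lines : List String) (d : PySem.Dict Int Int)
    (hcd : ∀ x : Int, d.contains x = decide (0 ≤ x ∧ x < M))
    (hlen : ∀ line ∈ lines, PySem.Str.len line ≤ M) :
    (∀ y, (lines.foldl (fun d line =>
      (PySem.List.pyRange 0 (PySem.Str.len line) 1).foldl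
        (fun d x => d.insert x (d.getD x 0 + (if PySem.Str.pyGet? line x = some '0' then 1 else -1))) d) d).contains y = d.contains y) ∧
    (lines.foldl (fun d line =>
      (PySem.List.pyRange 0 (PySem.Str.len line) 1).foldl
        (fun d x => d.insert x (d.getD x 0 + (if PySem.Str.pyGet? line x = some '0' then 1 else -1))) d) d).keys = d.keys ∧
    (∀ y, (lines.foldl (fun d line =>
      (PySem.List.pyRange 0 (PySem.Str.len line) 1).foldl
        (fun d x => d.insert x (d.getD x 0 + (if PySem.Str.pyGet? line x = some '0' then 1 else -1))) d) d).getD y 0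
      = d.getD y 0 + (lines.map (pvContrib y)).sum) := by
  induction lines generalizing d with
  | nil => simp
  | cons line rest ih =>
    have hinner := foldl_insert_upd
      (fun x => if PySem.Str.pyGet? line x = some '0' then 1 else -1)
      (PySem.List.pyRange 0 (PySem.Str.len line) 1) d
      (by
        intro x hx
        rw [PySem.List.mem_pyRange_one] at hx
        rw [hcd]
        have := hlen line (by simp)
        simp; omega)
      (PySem.List.nodup_pyRange_one 0 (PySem.Str.len line))
    obtain ⟨h1, h2, h3⟩ := hinner
    set d' := (PySem.List.pyRange 0 (PySem.Str.len line) 1).foldl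
        (fun d x => d.insert x (d.getD x 0 + (if PySem.Str.pyGet? line x = some '0' then 1 else -1))) d with hd'
    have hcd' : ∀ x : Int, d'.contains x = decide (0 ≤ x ∧ x < M) := by
      intro x; rw [h1, hcd]
    obtain ⟨ih1, ih2, ih3⟩ := ih d' hcd' (fun l hl => hlen l (by simp [hl]))
    refine ⟨?_, ?_, ?_⟩
    · intro y; simp only [List.foldl_cons]; rw [ih1, h1]
    · simp only [List.foldl_cons]; rw [ih2, h2]
    · intro y
      simp only [List.foldl_cons, List.map_cons, List.sum_cons]
      rw [ih3, h3]
      have : (if y ∈ PySem.List.pyRange 0 (PySem.Str.len line) 1 then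
          (if PySem.Str.pyGet? line y = some '0' then (1:Int) else -1) else 0) = pvContrib y line := by
        rw [pvContrib]
        by_cases hm : 0 ≤ y ∧ y < PySem.Str.len line
        · rw [if_pos (PySem.List.mem_pyRange_one.mpr hm), if_pos hm]
        · rw [if_neg (fun h => hm (PySem.List.mem_pyRange_one.mp h)), if_neg hm]
      rw [this]; ring

-- Pointwise: A's accumulated column value equals B's closed form.
theorem colsum_eq (x : Int) (hx : 0 ≤ x) (lines : List String) :
    (lines.map (pvContrib x)).sum
      = 2 * (lines.countP (fun line => PySem.Str.pyGet? line x == some '0') : Int)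
        - (lines.countP (fun line => decide (x < PySem.Str.len line)) : Int) := by
  induction lines with
  | nil => simp
  | cons line rest ih =>
    have hbridge := str_pyGet?_nonneg line x hx
    simp only [List.map_cons, List.sum_cons, List.countP_cons, ih, pvContrib]
    by_cases hlt : x < PySem.Str.len line
    · have hlen : x.toNat < line.toList.length := by
        rw [PySem.Str.len_eq] at hlt; omega
      rw [List.getElem?_eq_getElem hlen] at hbridge
      simp at hbridge hlt
      by_cases h0 : line.toList[x.toNat] = '0'
      · simp [h0, hlt, hx]
        ring
      · simp [h0, hlt, hx]
        ring
    · have hget : PySem.Str.pyGet? line x = none := by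
        rw [hbridge, List.getElem?_eq_none]
        rw [PySem.Str.len_eq] at hlt; omega
      simp at hget hlt
      have hlt2 : ¬ x < (line.length : Int) := by omega
      simp [hget, hlt2]

-- ===== VERDICT (by name: the statement is the Claim_ definition above) =====
theorem getCommonBitDict_spec : Claim_equal_getCommonBitDict := by
  intro data _hdom hpre
  obtain ⟨hne, hlen⟩ := hpre
  cases data with
  | nil => exact absurd rfl hne
  | cons h t =>
  unfold Spec_getCommonBitDict getCommonBitDict getCommonBitDict_alt
  simp only [PySem.List.pyGetD_zero_cons, List.headD_cons] at *
  set M := PySem.Str.len h with hM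
  have hM0 : 0 ≤ M := by rw [hM, PySem.Str.len_eq]; positivity
  -- the initial dict: fresh distinct keys 0..M-1 each mapped to 0
  set d0 : PySem.Dict Int Int :=
    (PySem.List.pyRange 0 M 1).foldl (fun d x => d.insert x 0) PySem.Dict.empty with hd0
  have hitems0 : d0.items = (PySem.List.pyRange 0 M 1).map (fun x => (x, (0:Int))) := by
    rw [hd0]
    have := PySem.Dict.items_foldl_insert_fresh (PySem.List.pyRange 0 M 1)
      (fun x => x) (fun _ => (0:Int)) PySem.Dict.empty
      (by intro a _; simp [PySem.Dict.contains_empty])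
      (by simpa using PySem.List.nodup_pyRange_one 0 M)
    simpa using this
  have hkeys0 : d0.keys = PySem.List.pyRange 0 M 1 := by
    simp only [PySem.Dict.keys, hitems0]
    simp [Function.comp_def]
  have hcont0 : ∀ x : Int, d0.contains x = decide (0 ≤ x ∧ x < M) := by
    intro x
    have hiff : d0.contains x = true ↔ (0 ≤ x ∧ x < M) := by
      rw [PySem.Dict.contains_iff_mem_keys, hkeys0, PySem.List.mem_pyRange_one]
    by_cases hy : 0 ≤ x ∧ x < M
    · simp [hy, hiff.mpr hy]
    · have hfalse : d0.contains x = false := by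
        rw [Bool.eq_false_iff]; exact fun hc => hy (hiff.mp hc)
      simp [hfalse, hy]
  have hgetD0 : ∀ y, d0.getD y 0 = 0 := by
    intro y
    by_cases hy : 0 ≤ y ∧ y < M
    · have hmem : (y, (0:Int)) ∈ d0.items := by
        rw [hitems0]; exact List.mem_map_of_mem (PySem.List.mem_pyRange_one.mpr hy)
      have hnd : d0.keys.Nodup := by
        rw [hkeys0]; exact PySem.List.nodup_pyRange_one 0 M
      exact PySem.Dict.getD_of_mem_items d0 hmem hnd 0
    · apply PySem.Dict.getD_of_not_contains
      rw [hcont0]; simpa using hy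
  obtain ⟨_, hkeys1, hgetD1⟩ := outer_loop M (h :: t) d0 hcont0
    (by intro line hl; exact hlen line hl)
  set d1 : PySem.Dict Int Int := (h :: t).foldl (fun d line =>
      (PySem.List.pyRange 0 (PySem.Str.len line) 1).foldl
        (fun d x => d.insert x (d.getD x 0 + (if PySem.Str.pyGet? line x = some '0' then 1 else -1))) d) d0 with hd1
  have hkeys1' : d1.keys = PySem.List.pyRange 0 M 1 := by rw [hkeys1, hkeys0]
  have hitems1 : d1.items = (PySem.List.pyRange 0 M 1).map
      (fun x => (x, ((h :: t).map (pvContrib x)).sum)) := by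
    rw [PySem.Dict.items_eq_map_keys d1 (by rw [hkeys1']; exact PySem.List.nodup_pyRange_one 0 M) 0,
      hkeys1']
    refine List.map_congr_left ?_
    intro x _
    rw [hgetD1, hgetD0, zero_add]
  -- B's dict: fresh distinct keys with the closed-form values
  have hitemsB : ((PySem.List.pyRange 0 M 1).foldl (fun d x =>
      d.insert x (2 * ((h :: t).countP (fun line => PySem.Str.pyGet? line x == some '0') : Int)
        - ((h :: t).countP (fun line => decide (x < PySem.Str.len line)) : Int))) PySem.Dict.empty).items
      = (PySem.List.pyRange 0 M 1).map (fun x => (x,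
          2 * ((h :: t).countP (fun line => PySem.Str.pyGet? line x == some '0') : Int)
            - ((h :: t).countP (fun line => decide (x < PySem.Str.len line)) : Int))) := by
    have := PySem.Dict.items_foldl_insert_fresh (PySem.List.pyRange 0 M 1)
      (fun x => x)
      (fun x => 2 * ((h :: t).countP (fun line => PySem.Str.pyGet? line x == some '0') : Int)
        - ((h :: t).countP (fun line => decide (x < PySem.Str.len line)) : Int))
      PySem.Dict.empty
      (by intro a _; simp [PySem.Dict.contains_empty])
      (by simpa using PySem.List.nodup_pyRange_one 0 M)
    simpa using this
  show d1.items = _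
  rw [hitems1, hitemsB]
  refine List.map_congr_left ?_
  intro x hxmem
  have hx0 : 0 ≤ x := (PySem.List.mem_pyRange_one.mp hxmem).1
  rw [colsum_eq x hx0]
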